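-- pv_equiv track=rewrite | github.com/mlaikhram/Castor | log_adder.py | get_fields_from_castor_string
-- ===== SOURCE A (Python) =====
-- def get_fields_from_castor_string(castor_string):
--     unparsed_fields = castor_string.split('{')[1:]
--     unparsed_fields = [field.split('}')[0] for field in unparsed_fields]
--     fields = []
--     for field in unparsed_fields:
--         if '(' in field:
--             fields.append(field.split('(')[0])
--         else:
--             fields.append(field)
--     return fields
-- ===== SOURCE B (Python) =====
-- def get_fields_from_castor_string(castor_string):
--     # single left-to-right scan: after each '{', collect characters up to the
--     # next '{', '}' or '(' as one field; no splitting or per-field passes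
--     fields = []
--     i = 0
--     n = len(castor_string)
--     while i < n:
--         ch = castor_string[i]
--         i += 1
--         if ch == '{':
--             start = i
--             while i < n and castor_string[i] not in '{}(':
--                 i += 1
--             fields.append(castor_string[start:i])
--     return fields
-- ===== Notes on version B (the rewrite author's own statement) =====
-- stated objective: alternative
-- what changed: Replaced the three-pass split('{') / split('}') / split('(') pipeline with a single character scan that emits, after each '{', the run of characters up to the next '{', '}' or '(' as one field.
import Mathlib
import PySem

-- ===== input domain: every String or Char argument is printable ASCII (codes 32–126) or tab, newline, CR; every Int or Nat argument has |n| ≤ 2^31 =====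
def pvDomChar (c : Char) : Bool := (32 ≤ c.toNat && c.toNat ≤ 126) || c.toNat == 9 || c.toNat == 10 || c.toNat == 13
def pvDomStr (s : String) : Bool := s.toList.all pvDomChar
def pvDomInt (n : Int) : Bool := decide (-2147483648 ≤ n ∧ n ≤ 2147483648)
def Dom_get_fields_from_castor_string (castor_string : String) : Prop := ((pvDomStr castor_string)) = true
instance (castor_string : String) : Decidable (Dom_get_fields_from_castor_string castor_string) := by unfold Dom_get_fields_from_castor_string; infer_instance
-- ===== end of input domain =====

-- B replaces A's split('{') / split('}') / split('(') pipeline by a single scan that,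
-- after each '{', emits the run of characters up to the next '{', '}' or '(' (alternative, same cost).

-- ===== PORT A =====
def get_fields_from_castor_string (castor_string : String) : List String :=
  let unparsed_fields := PySem.List.slice ((PySem.Str.split? castor_string "{").getD []) (some 1) none
  let unparsed_fields := unparsed_fields.map
    (fun field => PySem.List.pyGetD ((PySem.Str.split? field "}").getD []) 0 "")
  let fields := unparsed_fields.foldl
    (fun fields field =>
      if PySem.Str.isIn "(" field then
        fields ++ [PySem.List.pyGetD ((PySem.Str.split? field "(").getD []) 0 ""]
      else
        fields ++ [field]) []
  fields

-- ===== PORT B =====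
-- Source B's stop test: a field character is anything but '{', '}', '('
def pvKeep (c : Char) : Bool := !(c == '{' || c == '}' || c == '(')

-- the single pass of Source B: outer while = this recursion, inner while = takeWhile/dropWhile
def pvScan : List Char → List String
  | [] => []
  | c :: rest =>
    if c = '{' then
      String.ofList (rest.takeWhile pvKeep) :: pvScan (rest.dropWhile pvKeep)
    else
      pvScan rest
termination_by l => l.length
decreasing_by
  · exact Nat.lt_succ_of_le (List.length_dropWhile_le _ _)
  · exact Nat.lt_succ_self _

def get_fields_from_castor_string_alt (castor_string : String) : List String :=
  pvScan castor_string.toList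

-- ===== PRECONDITION & SPEC =====
def Spec_get_fields_from_castor_string (castor_string : String) (out : List String) : Prop := out = get_fields_from_castor_string_alt castor_string
instance (castor_string : String) (out : List String) : Decidable (Spec_get_fields_from_castor_string castor_string out) := by unfold Spec_get_fields_from_castor_string; infer_instance

-- ===== CLAIM (what is proved, stated in full; the proofs are below) =====
def Claim_equal_get_fields_from_castor_string : Prop := ∀ (castor_string : String), Dom_get_fields_from_castor_string castor_string → Spec_get_fields_from_castor_string castor_string (get_fields_from_castor_string castor_string)

-- ===== LEMMAS AND PROOFS =====

-- clean recursion for Python's split on a single-character separator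
def pvSplits (d : Char) (cs : List Char) : List (List Char) :=
  cs.takeWhile (· ≠ d) ::
    (if h : cs.dropWhile (· ≠ d) = [] then [] else pvSplits d (cs.dropWhile (· ≠ d)).tail)
termination_by cs.length
decreasing_by
  have h1 := List.length_dropWhile_le (fun c => decide (c ≠ d)) cs
  have h2 : (List.dropWhile (fun c => decide (c ≠ d)) cs).length ≠ 0 := by
    simpa [List.length_eq_zero_iff] using h
  rw [List.length_tail]
  omega

-- prepend into the head piece (what splitOn.go's accumulated `cur` contributes)
def pvConsHead (pre : List Char) : List (List Char) → List (List Char)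
  | [] => [pre]
  | x :: xs => (pre ++ x) :: xs

theorem pvSplits_nil (d : Char) : pvSplits d [] = [[]] := by
  rw [pvSplits.eq_def]; simp

theorem pvSplits_cons_eq (d : Char) (rest : List Char) :
    pvSplits d (d :: rest) = [] :: pvSplits d rest := by
  rw [pvSplits.eq_def]; simp

theorem pvSplits_cons_ne (d c : Char) (rest : List Char) (h : c ≠ d) :
    pvSplits d (c :: rest) = pvConsHead [c] (pvSplits d rest) := by
  rw [pvSplits.eq_def]
  conv_rhs => rw [pvSplits.eq_def]
  simp [pvConsHead, h]

theorem pvSplits_ne_nil (d : Char) (cs : List Char) : pvSplits d cs ≠ [] := by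
  rw [pvSplits.eq_def]; simp

theorem pvConsHead_nil_splits (d : Char) (l : List Char) :
    pvConsHead [] (pvSplits d l) = pvSplits d l := by
  rw [pvSplits.eq_def]; simp [pvConsHead]

theorem pvGo_spec (d : Char) :
    ∀ (fuel : Nat) (l cur : List Char) (acc : List (List Char)), l.length < fuel →
      PySem.Chars.splitOn.go [d] fuel l cur acc =
        acc.reverse ++ pvConsHead cur.reverse (pvSplits d l) := by
  intro fuel
  induction fuel with
  | zero => intro l cur acc h; omega
  | succ fuel ih =>
    intro l cur acc h
    cases l with
    | nil =>
      rw [PySem.Chars.splitOn.go.eq_def]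
      simp [pvSplits_nil, pvConsHead]
    | cons c rest =>
      rw [PySem.Chars.splitOn.go.eq_def]
      simp only [List.isPrefixOf_cons₂, List.isPrefixOf_nil_left, List.length_cons,
        Bool.and_true, List.drop_succ_cons, List.drop_zero, List.length_nil, Nat.zero_add]
      by_cases hc : d = c
      · rw [if_pos (by simp [hc])]
        rw [ih rest [] (cur.reverse :: acc) (by simp at h; omega)]
        subst hc
        simp [pvSplits_cons_eq, pvConsHead]
        cases hs : pvSplits d rest with
        | nil => exact absurd hs (pvSplits_ne_nil d rest)
        | cons x xs => rfl
      · rw [if_neg (by simp [hc])]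
        rw [ih rest (c :: cur) acc (by simp at h; omega)]
        rw [pvSplits_cons_ne d c rest (fun hh => hc hh.symm)]
        cases hs : pvSplits d rest with
        | nil => exact absurd hs (pvSplits_ne_nil d rest)
        | cons x xs => simp [pvConsHead]

theorem pvSplitOn_single (d : Char) (l : List Char) :
    PySem.Chars.splitOn l [d] = pvSplits d l := by
  have := pvGo_spec d (l.length + 1) l [] [] (Nat.lt_succ_self _)
  simpa [PySem.Chars.splitOn, pvConsHead_nil_splits] using this

theorem pvStrSplit (s : String) (d : Char) :
    (PySem.Str.split? s (String.ofList [d])).getD [] =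
      (pvSplits d s.toList).map String.ofList := by
  have hb := PySem.Str.split?_map s (String.ofList [d])
  rw [String.toList_ofList] at hb
  have hsome : PySem.Chars.split? s.toList [d] = some (pvSplits d s.toList) := by
    simp [PySem.Chars.split?, pvSplitOn_single]
  rw [hsome] at hb
  cases hx : PySem.Str.split? s (String.ofList [d]) with
  | none => rw [hx] at hb; simp at hb
  | some xs =>
    rw [hx] at hb
    simp only [Option.map_some, Option.some.injEq] at hb
    simp only [Option.getD_some]
    rw [← hb, List.map_map]
    simp [Function.comp_def]

theorem pvDropDrop (p q : Char → Bool) (hpq : ∀ c, p c = true → q c = true) :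
    ∀ l : List Char, (l.dropWhile p).dropWhile q = l.dropWhile q := by
  intro l
  induction l with
  | nil => rfl
  | cons c l ih =>
    by_cases hp : p c = true
    · rw [List.dropWhile_cons_of_pos hp, List.dropWhile_cons_of_pos (hpq c hp), ih]
    · rw [List.dropWhile_cons_of_neg hp]

theorem pvTake3 (cs : List Char) :
    ((cs.takeWhile (· ≠ '{')).takeWhile (· ≠ '}')).takeWhile (· ≠ '(') = cs.takeWhile pvKeep := by
  rw [List.takeWhile_takeWhile, List.takeWhile_takeWhile]
  congr 1
  funext a
  by_cases h1 : a = '{' <;> by_cases h2 : a = '}' <;> by_cases h3 : a = '(' <;>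
    simp [h1, h2, h3, pvKeep]

theorem pvSplits_head (d : Char) (l : List Char) :
    ∃ t, pvSplits d l = l.takeWhile (· ≠ d) :: t := by
  rw [pvSplits.eq_def]; exact ⟨_, rfl⟩

theorem pvHead_split (F : String) (d : Char) :
    PySem.List.pyGetD ((PySem.Str.split? F (String.ofList [d])).getD []) 0 "" =
      String.ofList (F.toList.takeWhile (· ≠ d)) := by
  obtain ⟨t, ht⟩ := pvSplits_head d F.toList
  rw [pvStrSplit F d, ht]
  simp [PySem.List.pyGetD_zero_cons]

theorem pvField (f : List Char) :
    (if PySem.Str.isIn "(" (PySem.List.pyGetD ((PySem.Str.split? (String.ofList f) "}").getD []) 0 "") then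
        PySem.List.pyGetD
          ((PySem.Str.split? (PySem.List.pyGetD ((PySem.Str.split? (String.ofList f) "}").getD []) 0 "") "(").getD [])
          0 ""
      else PySem.List.pyGetD ((PySem.Str.split? (String.ofList f) "}").getD []) 0 "") =
      String.ofList ((f.takeWhile (· ≠ '}')).takeWhile (· ≠ '(')) := by
  have h1 : PySem.List.pyGetD ((PySem.Str.split? (String.ofList f) "}").getD []) 0 "" =
      String.ofList (f.takeWhile (· ≠ '}')) := by
    have := pvHead_split (String.ofList f) '}'
    simpa using this
  rw [h1]
  by_cases hin : PySem.Str.isIn "(" (String.ofList (f.takeWhile (· ≠ '}'))) = true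
  · rw [if_pos hin]
    have := pvHead_split (String.ofList (f.takeWhile (· ≠ '}'))) '('
    simpa using this
  · rw [if_neg hin]
    have hmem : '(' ∉ f.takeWhile (· ≠ '}') := by
      intro hm
      apply hin
      have : PySem.Chars.isIn ['('] (f.takeWhile (· ≠ '}')) = true :=
        (PySem.Chars.isIn_iff_infix _ _).mpr ((List.singleton_infix_iff _ _).mpr hm)
      simpa using this
    have hself : List.takeWhile (fun x => decide (x ≠ '(')) (List.takeWhile (fun x => decide (x ≠ '}')) f) =
        List.takeWhile (fun x => decide (x ≠ '}')) f := by
      apply List.takeWhile_eq_self_iff.mpr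
      intro x hx
      simp only [decide_eq_true_eq]
      intro hxe; subst hxe; exact hmem hx
    rw [hself]

theorem pvTailStable (cs : List Char) :
    (pvSplits '{' (cs.dropWhile pvKeep)).tail = (pvSplits '{' cs).tail := by
  conv_lhs => rw [pvSplits.eq_def]
  conv_rhs => rw [pvSplits.eq_def]
  simp only [List.tail_cons]
  rw [pvDropDrop pvKeep (· ≠ '{') (by intro c hc; simp [pvKeep] at hc; simp [hc.1]) cs]

theorem pvMain : ∀ (n : Nat) (cs : List Char), cs.length ≤ n →
    pvScan cs =
      ((pvSplits '{' cs).tail).map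
        (fun f => String.ofList ((f.takeWhile (· ≠ '}')).takeWhile (· ≠ '('))) := by
  intro n
  induction n with
  | zero =>
    intro cs h
    rw [List.length_eq_zero_iff.mp (Nat.le_zero.mp h)]
    rw [pvScan.eq_def, pvSplits.eq_def]
    simp
  | succ n ih =>
    intro cs h
    cases cs with
    | nil =>
      rw [pvScan.eq_def, pvSplits.eq_def]
      simp
    | cons c rest =>
      by_cases hc : c = '{'
      · subst hc
        rw [pvScan.eq_def]
        rw [pvSplits_cons_eq]
        simp only [List.tail_cons]
        rw [ih (rest.dropWhile pvKeep)
          (Nat.le_trans (List.length_dropWhile_le _ _) (Nat.le_of_succ_le_succ h))]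
        rw [pvTailStable]
        obtain ⟨t, ht⟩ := pvSplits_head '{' rest
        rw [ht]
        simp only [List.map_cons, List.tail_cons]
        rw [pvTake3 rest]
        simp
      · rw [pvScan.eq_def]
        simp only [if_neg hc]
        rw [ih rest (Nat.le_of_succ_le_succ h)]
        rw [pvSplits_cons_ne '{' c rest hc]
        obtain ⟨t, ht⟩ := pvSplits_head '{' rest
        rw [ht]
        simp [pvConsHead]

theorem pvFinal (s : String) : get_fields_from_castor_string s = pvScan s.toList := by
  unfold get_fields_from_castor_string
  simp only
  rw [show ("{" : String) = String.ofList ['{'] from rfl, pvStrSplit s '{']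
  rw [PySem.List.slice_from_one]
  rw [pvMain s.toList.length s.toList (Nat.le_refl _)]
  rw [← List.map_tail]
  rw [List.map_map]
  rw [show (fun (fields : List String) (field : String) =>
        if PySem.Str.isIn "(" field = true then
          fields ++ [PySem.List.pyGetD ((PySem.Str.split? field "(").getD []) 0 ""]
        else fields ++ [field]) =
      (fun (fields : List String) (field : String) =>
        fields ++ [if PySem.Str.isIn "(" field = true then
          PySem.List.pyGetD ((PySem.Str.split? field "(").getD []) 0 "" else field])
    from funext fun a => funext fun x => by split <;> rfl]
  rw [PySem.List.foldl_append_singleton_eq_map]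
  rw [List.map_map]
  simp only [List.nil_append]
  apply List.map_congr_left
  intro f _
  exact pvField f

-- ===== VERDICT (by name: the statement is the Claim_ definition above) =====
theorem get_fields_from_castor_string_spec : Claim_equal_get_fields_from_castor_string := by
  intro s _
  unfold Spec_get_fields_from_castor_string get_fields_from_castor_string_alt
  exact pvFinal s
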